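-- pv_equiv track=rewrite | github.com/Revi1337/BaekJoon-Coding-Test | 백준/Silver/1614. 영식이의 손가락/영식이의 손가락.py | solution
-- ===== SOURCE A (Python) =====
-- def solution(N, K):
--     answer = 0
--     if K == 0:
--         if N == 1:
--             return 0
--         for num in range(1, N + 1):
--             if num == N:
--                 break
--             answer += 1
--         return answer
--     else:
--         K -= 1
--         answer += 5
--
--         if N == 1:
--             if K != 0:
--                 answer += 8 * K
--             for num in range(4, 0, -1):
--                 if num == N:
--                     break
--                 answer += 1
--
--         elif N == 5:
--             if K != 0:
--                 answer += 8 * K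
--             answer += 4
--             for num in range(2, 6):
--                 if num == N:
--                     break
--                 answer += 1
--
--         else:
--             odd = K % 2
--             answer += (4 * K)
--             if not odd:
--                 for num in range(4, 0, -1):
--                     if num == N:
--                         break
--                     answer += 1
--             else:
--                 for num in range(2, 6):
--                     if num == N:
--                         break
--                     answer += 1
--
--     return answer
-- ===== SOURCE B (Python) =====
-- def solution(N, K):
--     # closed-form arithmetic: each counting loop of A replaced by its value
--     if K == 0:
--         return N - 1 if N > 1 else 0
--     k = K - 1
--     if N == 1:
--         return 8 * K
--     if N == 5:
--         return 8 * K + 4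
--     off = ((4 - N) if k % 2 == 0 else (N - 2)) if 2 <= N <= 4 else 4
--     return 5 + 4 * k + off
-- ===== Notes on version B (the rewrite author's own statement) =====
-- stated objective: simpler
-- what changed: Replaces every counting loop (and the break-search over the finger ranges) with its closed-form arithmetic value, flattening A's loop-plus-branch cascade into direct expressions.
import Mathlib
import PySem

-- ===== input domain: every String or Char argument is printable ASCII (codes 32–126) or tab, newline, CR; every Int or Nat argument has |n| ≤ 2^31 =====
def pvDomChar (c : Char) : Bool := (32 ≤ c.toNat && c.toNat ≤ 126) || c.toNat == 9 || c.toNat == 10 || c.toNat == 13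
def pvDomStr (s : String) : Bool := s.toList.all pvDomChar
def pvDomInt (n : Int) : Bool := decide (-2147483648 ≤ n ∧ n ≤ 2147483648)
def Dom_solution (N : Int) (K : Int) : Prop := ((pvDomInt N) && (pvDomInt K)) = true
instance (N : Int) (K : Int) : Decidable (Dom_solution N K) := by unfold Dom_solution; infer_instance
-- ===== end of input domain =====

-- B replaces each counting loop of A by its closed-form value (objective: simpler).

-- ===== PORT A =====
-- 'for num in …: if num == N: break; answer += 1' — count elements before the first hit
def loopCount (l : List Int) (target : Int) (acc : Int) : Int :=
  match l with
  | [] => acc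
  | x :: xs => if x = target then acc else loopCount xs target (acc + 1)

def solution (N : Int) (K : Int) : Int :=
  if K = 0 then
    if N = 1 then 0
    else loopCount (PySem.List.pyRange 1 (N + 1) 1) N 0
  else
    let K' := K - 1
    let answer : Int := 5
    if N = 1 then
      let answer := if K' ≠ 0 then answer + 8 * K' else answer
      loopCount (PySem.List.pyRange 4 0 (-1)) N answer
    else if N = 5 then
      let answer := if K' ≠ 0 then answer + 8 * K' else answer
      loopCount (PySem.List.pyRange 2 6 1) N (answer + 4)
    else
      let odd := PySem.Int.mod K' 2
      let answer := answer + 4 * K'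
      if odd = 0 then loopCount (PySem.List.pyRange 4 0 (-1)) N answer
      else loopCount (PySem.List.pyRange 2 6 1) N answer

-- ===== PORT B =====
def solution_alt (N : Int) (K : Int) : Int :=
  if K = 0 then (if N > 1 then N - 1 else 0)
  else
    let k := K - 1
    if N = 1 then 8 * K
    else if N = 5 then 8 * K + 4
    else
      let off := if 2 ≤ N ∧ N ≤ 4 then (if PySem.Int.mod k 2 = 0 then 4 - N else N - 2) else 4
      5 + 4 * k + off

-- ===== PRECONDITION & SPEC =====
def Spec_solution (N : Int) (K : Int) (out : Int) : Prop := out = solution_alt N K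
instance (N : Int) (K : Int) (out : Int) : Decidable (Spec_solution N K out) := by unfold Spec_solution; infer_instance

-- ===== CLAIM (what is proved, stated in full; the proofs are below) =====
def Claim_equal_solution : Prop := ∀ (N : Int) (K : Int), Dom_solution N K → Spec_solution N K (solution N K)

-- ===== LEMMAS AND PROOFS =====
lemma loopCount_range_aux : ∀ (m : Nat) (a n acc : Int), a ≤ n → (n - a).toNat = m →
    loopCount (PySem.List.pyRange a (n + 1) 1) n acc = acc + (n - a) := by
  intro m
  induction m with
  | zero =>
    intro a n acc h hm
    have ha : a = n := by omega
    subst ha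
    rw [PySem.List.pyRange_one_cons (by omega)]
    simp [loopCount]
  | succ m ih =>
    intro a n acc h hm
    have hlt : a < n := by omega
    rw [PySem.List.pyRange_one_cons (by omega)]
    have hne : a ≠ n := by omega
    rw [loopCount, if_neg hne]
    rw [ih (a + 1) n (acc + 1) (by omega) (by omega)]
    ring

lemma range_down : PySem.List.pyRange 4 0 (-1) = [4, 3, 2, 1] := by decide

lemma range_up : PySem.List.pyRange 2 6 1 = [2, 3, 4, 5] := by decide

-- ===== VERDICT (by name: the statement is the Claim_ definition above) =====
theorem solution_spec : Claim_equal_solution := by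
  intro N K _
  unfold Spec_solution solution solution_alt
  by_cases hK : K = 0
  · rw [if_pos hK, if_pos hK]
    by_cases hN1 : N = 1
    · simp [hN1]
    · rw [if_neg hN1]
      rcases (by omega : N ≤ 0 ∨ 0 < N) with h | h
      · rw [PySem.List.pyRange_one_eq_nil (by omega)]
        simp only [loopCount]
        rw [if_neg (by omega)]
      · have h2 : 2 ≤ N := by omega
        rw [loopCount_range_aux (N - 1).toNat 1 N 0 (by omega) (by omega)]
        rw [if_pos (by omega)]
        ring
  · rw [if_neg hK, if_neg hK]
    simp only [range_down, range_up, loopCount]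
    split_ifs <;> omega
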